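-- pv_equiv track=rewrite | github.com/gaaona/Algorithm | SWEA/D1/22375. 스위치 조작/스위치 조작.py | switch_lights
-- ===== SOURCE A (Python) =====
-- def switch_lights(N, A, B): # Ai를 Bi로 만드는
--     i = 0
--     cnt = 0
--     # 0번 인덱스부터 1:1 비교하는 함수
--     while i < N:
--         if A[i] == B[i]:
--             i += 1
--         else: # 다르면 거기부터 뒤에 다 뒤집기  & cnt += 1
--             j = i
--             cnt += 1
--             while j <N:
--                 B[j] = 1 - B[j]
--                 j += 1
--             i += 1 # 달랐던 인덱스 다음부터 다시 1:1 비교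
--
--     return cnt # 배열 끝나면 cnt 반환
-- ===== SOURCE B (Python) =====
-- def switch_lights(N, A, B):
--     # Single pass: track the parity of suffix flips instead of mutating B.
--     cnt = 0
--     flipped = False
--     for i in range(N):
--         b = 1 - B[i] if flipped else B[i]
--         if A[i] != b:
--             cnt += 1
--             flipped = not flipped
--     return cnt
-- ===== Notes on version B (the rewrite author's own statement) =====
-- stated objective: faster
-- what changed: Replaces the quadratic loop that physically flips the whole suffix of B on each mismatch with a single pass that tracks the flip parity; B is not mutated (A mutates B in place; the equivalence is about the return value).
import Mathlib
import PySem

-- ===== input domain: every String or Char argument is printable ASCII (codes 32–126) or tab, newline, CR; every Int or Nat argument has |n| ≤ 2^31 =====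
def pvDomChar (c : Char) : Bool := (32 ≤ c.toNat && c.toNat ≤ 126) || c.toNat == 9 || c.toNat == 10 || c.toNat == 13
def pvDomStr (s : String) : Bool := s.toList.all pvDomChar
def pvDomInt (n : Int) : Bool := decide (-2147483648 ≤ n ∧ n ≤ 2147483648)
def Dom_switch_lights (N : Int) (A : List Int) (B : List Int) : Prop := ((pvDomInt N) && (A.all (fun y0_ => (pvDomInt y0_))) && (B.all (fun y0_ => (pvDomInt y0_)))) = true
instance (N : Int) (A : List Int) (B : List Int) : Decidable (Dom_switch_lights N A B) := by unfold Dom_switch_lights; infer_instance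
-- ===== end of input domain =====

-- B replaces A's quadratic suffix-flipping loop with one pass tracking flip parity (faster);
-- A mutates B in place, B does not — the equivalence proved here is about the return value only.
-- ===== PORT A =====
-- inner 'while j < N: B[j] = 1 - B[j]' loop of A (list indexing exact under Pre_)
def flipFrom (N : Int) (j : Nat) (B : List Int) : List Int :=
  if (j : Int) < N then flipFrom N (j + 1) (B.set j (1 - B.getD j 0))
  else B
termination_by (N - j).toNat
decreasing_by omega

-- outer 'while i < N' loop of A, state (i, B, cnt)
def loopA (N : Int) (A : List Int) (i : Nat) (B : List Int) (cnt : Int) : Int :=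
  if (i : Int) < N then
    if A.getD i 0 = B.getD i 0 then loopA N A (i + 1) B cnt
    else loopA N A (i + 1) (flipFrom N i B) (cnt + 1)
  else cnt
termination_by (N - i).toNat
decreasing_by all_goals omega

def switch_lights (N : Int) (A : List Int) (B : List Int) : Int :=
  loopA N A 0 B 0

-- ===== PORT B =====
-- the 'for i in range(N)' loop of Source B, state (cnt, flipped)
def loopB (N : Int) (A : List Int) (B : List Int) (i : Nat) (cnt : Int) (flipped : Bool) : Int :=
  if (i : Int) < N then
    let b := if flipped then 1 - B.getD i 0 else B.getD i 0
    if A.getD i 0 ≠ b then loopB N A B (i + 1) (cnt + 1) (!flipped)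
    else loopB N A B (i + 1) cnt flipped
  else cnt
termination_by (N - i).toNat
decreasing_by all_goals omega

def switch_lights_alt (N : Int) (A : List Int) (B : List Int) : Int :=
  loopB N A B 0 0 false

-- ===== PRECONDITION & SPEC =====
-- Pre_ excludes exactly the inputs on which A raises IndexError (some index i < N out of range).
def Pre_switch_lights (N : Int) (A : List Int) (B : List Int) : Prop :=
  N ≤ (A.length : Int) ∧ N ≤ (B.length : Int)
instance (N : Int) (A : List Int) (B : List Int) : Decidable (Pre_switch_lights N A B) := by
  unfold Pre_switch_lights; infer_instance
def pvWitness_switch_lights : Int × List Int × List Int := (2, ([1, 0], [0, 0]))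

def Spec_switch_lights (N : Int) (A : List Int) (B : List Int) (out : Int) : Prop := out = switch_lights_alt N A B
instance (N : Int) (A : List Int) (B : List Int) (out : Int) : Decidable (Spec_switch_lights N A B out) := by unfold Spec_switch_lights; infer_instance

-- ===== CLAIM (what is proved, stated in full; the proofs are below) =====
def Claim_equal_switch_lights : Prop := ∀ (N : Int) (A : List Int) (B : List Int), Dom_switch_lights N A B → Pre_switch_lights N A B → Spec_switch_lights N A B (switch_lights N A B)

-- ===== LEMMAS AND PROOFS =====

lemma flipFrom_length (N : Int) (j : Nat) (B : List Int) :
    (flipFrom N j B).length = B.length := by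
  unfold flipFrom
  split
  · rw [flipFrom_length N (j + 1)]; simp
  · rfl
termination_by (N - j).toNat
decreasing_by omega

lemma flipFrom_getD (N : Int) (j : Nat) (B : List Int) (k : Nat) :
    (flipFrom N j B).getD k 0 =
      if j ≤ k ∧ (k : Int) < N ∧ k < B.length then 1 - B.getD k 0 else B.getD k 0 := by
  unfold flipFrom
  split
  · rename_i hj
    rw [flipFrom_getD N (j + 1)]
    rcases Nat.lt_trichotomy j k with h | h | h
    · simp only [List.length_set]
      have hne : j ≠ k := Nat.ne_of_lt h
      by_cases hk : j + 1 ≤ k ∧ (k : Int) < N ∧ k < B.length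
      · rw [if_pos hk, if_pos ⟨Nat.le_of_lt h, hk.2⟩]
        congr 1
        simp [List.getD, hne]
      · rw [if_neg hk, if_neg (by omega)]
        simp [List.getD, hne]
    · subst h
      by_cases hl : j < B.length
      · rw [if_neg (by omega), if_pos ⟨le_refl _, hj, hl⟩]
        simp [List.getD, List.getElem?_set_self hl, List.getElem?_eq_getElem hl]
      · rw [if_neg (by simp only [List.length_set]; omega), if_neg (by omega)]
        simp [List.getD, hl]
    · rw [if_neg (by omega), if_neg (by omega)]
      have hne : j ≠ k := by omega
      simp [List.getD, hne]
  · rw [if_neg (by omega)]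
termination_by (N - j).toNat
decreasing_by omega

-- main invariant: A's loop on a physically-flipped list equals B's parity-tracking loop
lemma loop_eq (N : Int) (A B : List Int) (hB : N ≤ (B.length : Int))
    (i : Nat) (B' : List Int) (cnt : Int) (flipped : Bool)
    (hlen : B'.length = B.length)
    (hinv : ∀ k : Nat, i ≤ k → (k : Int) < N →
      B'.getD k 0 = if flipped then 1 - B.getD k 0 else B.getD k 0) :
    loopA N A i B' cnt = loopB N A B i cnt flipped := by
  unfold loopA loopB
  split
  · rename_i hi
    simp only []
    have hBi : B'.getD i 0 = if flipped then 1 - B.getD i 0 else B.getD i 0 :=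
      hinv i le_rfl hi
    by_cases heq : A.getD i 0 = B'.getD i 0
    · rw [if_pos heq, if_neg (by rw [← hBi]; simpa using heq)]
      exact loop_eq N A B hB (i + 1) B' cnt flipped hlen
        (fun k hk hkN => hinv k (by omega) hkN)
    · rw [if_neg heq, if_pos (by rw [← hBi]; exact heq)]
      refine loop_eq N A B hB (i + 1) (flipFrom N i B') (cnt + 1) (!flipped)
        (by rw [flipFrom_length, hlen]) ?_
      intro k hk hkN
      have hkl : k < B'.length := by omega
      rw [flipFrom_getD, if_pos ⟨by omega, hkN, hkl⟩, hinv k (by omega) hkN]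
      cases flipped <;> simp
  · rfl
termination_by (N - i).toNat
decreasing_by all_goals omega

theorem switch_lights_spec : Claim_equal_switch_lights := by
  intro N A B _ hPre
  unfold Spec_switch_lights switch_lights switch_lights_alt
  exact loop_eq N A B hPre.2 0 B 0 false rfl (fun k _ _ => rfl)
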